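-- pv_equiv track=rewrite | github.com/abhinaba01/python-dsa | oracleInterview.py | countGoodSubsequence
-- ===== SOURCE A (Python) =====
-- def countGoodSubsequence(name):
--     MOD = 10**9 + 7
--     freq = {}
--
--     for ch in name:
--         freq[ch] = freq.get(ch,0) + 1
--
--     maxFreq = max(freq.values())
--
--     def countSubsequences(k):
--         cnt = 0
--         for key,value in freq.items():
--             if value >= k:
--                 cnt += 1
--         return (2 ** cnt - 1) % MOD
--
--
--     count = 0
--     for i in range(1,maxFreq+1):
--         count = (count + countSubsequences(i)) % MOD
--
--     return count
-- ===== SOURCE B (Python) =====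
-- def countGoodSubsequence(name):
--     MOD = 10**9 + 7
--     freq = {}
--     for ch in name:
--         freq[ch] = freq.get(ch, 0) + 1
--     fs = sorted(freq.values(), reverse=True)
--     total = 0
--     pw = 1
--     for j in range(len(fs)):
--         pw = pw * 2 % MOD
--         nxt = fs[j + 1] if j + 1 < len(fs) else 0
--         total = (total + (fs[j] - nxt) * ((pw - 1) % MOD)) % MOD
--     return total
-- ===== Notes on version B (the rewrite author's own statement) =====
-- stated objective: faster
-- what changed: Instead of recounting, for every threshold k=1..maxFreq, how many characters have frequency >= k (an inner scan per k), B sorts the frequencies once in descending order and adds each (2^j - 1) term multiplied by the width fs[j]-fs[j+1] of the k-range on which the count equals j, keeping powers of 2 reduced mod p.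
import Mathlib
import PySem

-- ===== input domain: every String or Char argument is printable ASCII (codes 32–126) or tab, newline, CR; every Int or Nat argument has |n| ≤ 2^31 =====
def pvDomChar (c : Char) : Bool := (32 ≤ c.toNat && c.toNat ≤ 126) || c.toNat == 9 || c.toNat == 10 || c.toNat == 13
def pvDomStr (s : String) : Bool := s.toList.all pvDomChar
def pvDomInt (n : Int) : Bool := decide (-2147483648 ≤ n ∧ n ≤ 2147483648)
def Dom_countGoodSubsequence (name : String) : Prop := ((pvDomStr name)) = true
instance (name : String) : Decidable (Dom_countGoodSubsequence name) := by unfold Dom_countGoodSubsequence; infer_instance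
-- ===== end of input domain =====

-- B replaces A's per-threshold rescans of the frequency table by one descending sort of the
-- frequencies and a single aggregated pass (contribution (fs[j]-fs[j+1])·(2^(j+1)-1) per rank),
-- with powers of 2 kept reduced mod 10^9+7; objective: faster.

-- ===== PORT A =====
-- shared helper: the frequency-counting loop `for ch in name: freq[ch] = freq.get(ch,0)+1`,
-- which A and B contain verbatim
def pvCountFreq (name : String) : PySem.Dict Char Int :=
  name.toList.foldl (fun d ch => d.insert ch (d.getD ch 0 + 1)) PySem.Dict.empty

def pvMOD : Int := 10 ^ 9 + 7

def countGoodSubsequence (name : String) : Int :=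
  let freq := pvCountFreq name
  match PySem.List.max? freq.values (fun v => v) with
  | none => 0   -- max() raises ValueError here (empty dict); excluded by Pre_
  | some maxFreq =>
    let countSubsequences : Int → Int := fun k =>
      let cnt : Int := freq.items.foldl (fun cnt kv => if kv.2 ≥ k then cnt + 1 else cnt) 0
      -- 2 ** cnt: cnt is a count, hence ≥ 0, so `2 ^ cnt.toNat` is exact
      PySem.Int.mod (2 ^ cnt.toNat - 1) pvMOD
    (PySem.List.pyRange 1 (maxFreq + 1) 1).foldl
      (fun count i => PySem.Int.mod (count + countSubsequences i) pvMOD) 0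

-- ===== PORT B =====
-- `fs[j+1] if j + 1 < len(fs) else 0` : the head of the rest of the list, 0 past the end
def pvHd (fs : List Int) : Int := match fs with | [] => 0 | f :: _ => f

-- the indexed loop `for j in range(len(fs))` of Source B: `f` is fs[j], `nxt` is fs[j+1] (0 past the end)
def pvAltLoop : List Int → Int → Int → Int
  | [], _, total => total
  | f :: rest, pw, total =>
    let pw' := PySem.Int.mod (pw * 2) pvMOD
    let nxt : Int := pvHd rest
    pvAltLoop rest pw' (PySem.Int.mod (total + (f - nxt) * (PySem.Int.mod (pw' - 1) pvMOD)) pvMOD)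

def countGoodSubsequence_alt (name : String) : Int :=
  let freq := pvCountFreq name
  let fs := PySem.List.sorted freq.values (fun v => v) true
  pvAltLoop fs 1 0

-- ===== PRECONDITION & SPEC =====
-- Pre_ excludes only the empty string, on which A raises ValueError (max() of an empty sequence)
def Pre_countGoodSubsequence (name : String) : Prop := name ≠ ""
instance (name : String) : Decidable (Pre_countGoodSubsequence name) := by unfold Pre_countGoodSubsequence; infer_instance
def pvWitness_countGoodSubsequence : String := "ab"

def Spec_countGoodSubsequence (name : String) (out : Int) : Prop := out = countGoodSubsequence_alt name
instance (name : String) (out : Int) : Decidable (Spec_countGoodSubsequence name out) := by unfold Spec_countGoodSubsequence; infer_instance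

-- ===== CLAIM (what is proved, stated in full; the proofs are below) =====
def Claim_equal_countGoodSubsequence : Prop := ∀ (name : String), Dom_countGoodSubsequence name → Pre_countGoodSubsequence name → Spec_countGoodSubsequence name (countGoodSubsequence name)

-- ===== LEMMAS AND PROOFS =====

-- (2^n - 1) mod p : the value A adds for a threshold whose survivor count is n
def pvT (n : Nat) : Int := PySem.Int.mod (2 ^ n - 1) pvMOD

-- the exact (un-modded) sum B's loop accumulates, d = number of ranks already consumed
def pvBsum : List Int → Nat → Int
  | [], _ => 0
  | f :: r, d => (f - pvHd r) * pvT (d + 1) + pvBsum r (d + 1)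

theorem pvMOD_pos : (0:Int) < pvMOD := by norm_num [pvMOD]

-- a running-mod fold is the mod of the plain sum
theorem pv_foldl_mod (g : Int → Int) : ∀ (l : List Int) (a : Int),
    l.foldl (fun c i => PySem.Int.mod (c + g i) pvMOD) (PySem.Int.mod a pvMOD)
      = PySem.Int.mod (a + (l.map g).sum) pvMOD := by
  intro l
  induction l with
  | nil => intro a; simp
  | cons i l ih =>
    intro a
    have h1 : PySem.Int.mod (PySem.Int.mod a pvMOD + g i) pvMOD
        = PySem.Int.mod (a + g i) pvMOD := by
      simp [PySem.Int.mod_eq_emod_of_pos pvMOD_pos, Int.emod_add_emod]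
    simp only [List.foldl_cons, h1, ih (a + g i), List.map_cons, List.sum_cons]
    ring_nf
  
-- B's loop, characterised: pw carries 2^d mod p, total carries a mod p
theorem pv_altLoop : ∀ (l : List Int) (d : Nat) (a : Int),
    pvAltLoop l (PySem.Int.mod (2 ^ d) pvMOD) (PySem.Int.mod a pvMOD)
      = PySem.Int.mod (a + pvBsum l d) pvMOD := by
  intro l
  induction l with
  | nil => intro d a; simp [pvAltLoop, pvBsum]
  | cons f r ih =>
    intro d a
    have hM := pvMOD_pos
    have hpw : PySem.Int.mod (PySem.Int.mod (2 ^ d) pvMOD * 2) pvMOD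
        = PySem.Int.mod (2 ^ (d + 1)) pvMOD := by
      simp [PySem.Int.mod_eq_emod_of_pos hM, Int.mul_emod, pow_succ]
    have ht : PySem.Int.mod (PySem.Int.mod (2 ^ (d + 1)) pvMOD - 1) pvMOD = pvT (d + 1) := by
      simp [pvT, PySem.Int.mod_eq_emod_of_pos hM, Int.sub_emod]
    have htot : PySem.Int.mod (PySem.Int.mod a pvMOD + (f - pvHd r) * pvT (d + 1)) pvMOD
        = PySem.Int.mod (a + (f - pvHd r) * pvT (d + 1)) pvMOD := by
      simp [PySem.Int.mod_eq_emod_of_pos hM, Int.emod_add_emod]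
    show pvAltLoop r _ _ = _
    rw [hpw, ht, htot, ih (d + 1) (a + (f - pvHd r) * pvT (d + 1))]
    simp [pvBsum]; ring_nf

-- the count loop inside countSubsequences is countP over the values
theorem pv_cnt (k : Int) (items : List (Char × Int)) :
    items.foldl (fun cnt kv => if kv.2 ≥ k then cnt + 1 else cnt) (0:Int)
      = ((items.map (·.2)).countP (fun v => decide (k ≤ v)) : Int) := by
  have := PySem.List.foldl_count_if (fun kv : Char × Int => decide (k ≤ kv.2)) items 0
  simp only [ge_iff_le, decide_eq_true_eq] at this ⊢
  rw [this, List.countP_map]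
  simp only [zero_add]
  rfl

-- MAIN: for a descending list of nonnegative frequencies, the per-threshold sum of
-- pvT(d + survivors) over thresholds 1..head equals B's aggregated sum
theorem pv_main : ∀ (l : List Int), l.Pairwise (fun a b => b ≤ a) → (∀ x ∈ l, 0 ≤ x) →
    ∀ d : Nat,
    ((PySem.List.pyRange 1 (pvHd l + 1) 1).map
        (fun k => pvT (d + l.countP (fun v => decide (k ≤ v))))).sum = pvBsum l d := by
  intro l
  induction l with
  | nil =>
    intro _ _ d
    rw [show pvHd [] = 0 from rfl, PySem.List.pyRange_one_eq_nil (by norm_num)]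
    simp [pvBsum]
  | cons f r ih =>
    intro hp hn d
    have hf0 : (0:Int) ≤ f := hn f (by simp)
    have hfr : ∀ x ∈ r, x ≤ f := (List.pairwise_cons.mp hp).1
    have hpr : r.Pairwise (fun a b => b ≤ a) := (List.pairwise_cons.mp hp).2
    have hnr : ∀ x ∈ r, 0 ≤ x := fun x hx => hn x (by simp [hx])
    have hh0 : (0:Int) ≤ pvHd r := by
      cases r with
      | nil => simp [pvHd]
      | cons g t => exact hnr g (by simp)
    have hhf : pvHd r ≤ f := by
      cases r with
      | nil => simpa [pvHd] using hf0
      | cons g t => exact hfr g (by simp)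
    have hrle : ∀ x ∈ r, x ≤ pvHd r := by
      cases r with
      | nil => simp
      | cons g t =>
        intro x hx
        rcases List.mem_cons.mp hx with h | h
        · simp [pvHd, h]
        · exact (List.pairwise_cons.mp hpr).1 x h
    -- split the threshold range at pvHd r
    rw [show pvHd (f :: r) = f from rfl,
        PySem.List.pyRange_one_append 1 (pvHd r + 1) (f + 1) (by omega) (by omega),
        List.map_append, List.sum_append]
    -- low part: every k ≤ pvHd r also satisfies k ≤ f, count = countP r + 1
    have hlow : ((PySem.List.pyRange 1 (pvHd r + 1) 1).map
          (fun k => pvT (d + (f :: r).countP (fun v => decide (k ≤ v))))).sum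
        = pvBsum r (d + 1) := by
      rw [← ih hpr hnr (d + 1)]
      apply congrArg
      apply List.map_congr_left
      intro k hk
      rcases PySem.List.mem_pyRange_one.mp hk with ⟨hk1, hk2⟩
      have hkf : k ≤ f := by omega
      rw [List.countP_cons]
      simp only [decide_eq_true_eq]
      rw [if_pos hkf]
      congr 1
      omega
    -- high part: every k > pvHd r kills all of r, count = 1
    have hhigh : ((PySem.List.pyRange (pvHd r + 1) (f + 1) 1).map
          (fun k => pvT (d + (f :: r).countP (fun v => decide (k ≤ v))))).sum
        = (f - pvHd r) * pvT (d + 1) := by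
      have hconst : ∀ k ∈ PySem.List.pyRange (pvHd r + 1) (f + 1) 1,
          pvT (d + (f :: r).countP (fun v => decide (k ≤ v))) = pvT (d + 1) := by
        intro k hk
        rcases PySem.List.mem_pyRange_one.mp hk with ⟨hk1, hk2⟩
        have hr0 : r.countP (fun v => decide (k ≤ v)) = 0 := by
          rw [List.countP_eq_zero]
          intro x hx
          simp only [decide_eq_true_eq]
          have := hrle x hx
          omega
        rw [List.countP_cons]
        simp only [decide_eq_true_eq]
        rw [if_pos (by omega : k ≤ f), hr0]
      rw [List.map_congr_left hconst, PySem.List.sum_map_const_int,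
          PySem.List.length_pyRange_one]
      congr 1
      omega
    rw [hlow, hhigh, show pvBsum (f :: r) d = (f - pvHd r) * pvT (d + 1) + pvBsum r (d + 1) from rfl]
    ring

-- all stored frequencies are ≥ 1, and the table is nonempty on a nonempty string
theorem pv_values_eq (name : String) :
    (pvCountFreq name).values
      = (PySem.Set.ofList name.toList).map (fun k => (name.toList.count k : Int)) := by
  show (pvCountFreq name).items.map (·.2) = _
  rw [show pvCountFreq name = PySem.Dict.counter name.toList from
        PySem.Dict.foldl_insert_getD_add_one_eq_counter name.toList,
      PySem.Dict.items_counter, List.map_map]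
  rfl

theorem pv_values_pos (name : String) : ∀ v ∈ (pvCountFreq name).values, (1:Int) ≤ v := by
  intro v hv
  rw [pv_values_eq] at hv
  rcases List.mem_map.mp hv with ⟨k, hk, rfl⟩
  have : k ∈ name.toList := (PySem.Set.mem_ofList _ _).mp hk
  have := List.count_pos_iff.mpr this
  omega

theorem pv_values_ne_nil (name : String) (h : name ≠ "") : (pvCountFreq name).values ≠ [] := by
  rw [pv_values_eq]
  intro hc
  rcases List.map_eq_nil_iff.mp hc with hnil
  have : name.toList ≠ [] := fun h0 => h (String.toList_eq_nil_iff.mp h0)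
  cases hl : name.toList with
  | nil => exact this hl
  | cons c t =>
    have : c ∈ PySem.Set.ofList name.toList := (PySem.Set.mem_ofList _ _).mpr (by rw [hl]; simp)
    rw [hnil] at this
    simp at this

-- ===== VERDICT (by name: the statement is the Claim_ definition above) =====
theorem countGoodSubsequence_spec : Claim_equal_countGoodSubsequence := by
  intro name _ hpre
  show countGoodSubsequence name = countGoodSubsequence_alt name
  have hL := pv_values_ne_nil name hpre
  set L := (pvCountFreq name).values with hLdef
  set fs := PySem.List.sorted L (fun v => v) true with hfs
  have hperm : fs.Perm L := PySem.List.sorted_perm L (fun v => v) true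
  have hfs_ne : fs ≠ [] := by
    rw [hfs]; intro hc; exact hL ((PySem.List.sorted_eq_nil_iff _ _ _).mp hc)
  obtain ⟨h, t, hfst⟩ := List.exists_cons_of_ne_nil hfs_ne
  -- max? L = some (pvHd fs)
  obtain ⟨m, hm⟩ : ∃ m, PySem.List.max? L (fun v => v) = some m := by
    cases hmx : PySem.List.max? L (fun v => v) with
    | none => exact absurd ((PySem.List.max?_eq_none_iff _ _).mp hmx) hL
    | some m => exact ⟨m, rfl⟩
  have hmh : m = h := by
    have h1 : ∀ y ∈ L, y ≤ h :=
      PySem.List.key_head_sorted_rev_ge L (fun v => v) (hfs.symm.trans hfst)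
    have h2 : h ∈ L := hperm.mem_iff.mp (by rw [hfst]; simp)
    have h3 : ∀ y ∈ L, y ≤ m := PySem.List.max?_isMax hm
    have h4 : m ∈ L := PySem.List.max?_mem hm
    exact le_antisymm (h1 m h4) (h3 h h2)
  -- facts about fs
  have hpos : ∀ x ∈ fs, (0:Int) ≤ x := by
    intro x hx
    have : x ∈ L := hperm.mem_iff.mp hx
    have := pv_values_pos name x this
    omega
  have hpw : fs.Pairwise (fun a b => b ≤ a) := PySem.List.sorted_pairwise_rev L (fun v => v)
  -- A's value
  have hA : countGoodSubsequence name
      = PySem.Int.mod ((PySem.List.pyRange 1 (h + 1) 1).map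
          (fun k => pvT (L.countP (fun v => decide (k ≤ v))))).sum pvMOD := by
    show (match PySem.List.max? L (fun v => v) with
      | none => (0:Int)
      | some maxFreq => _) = _
    rw [hm, hmh]
    have := pv_foldl_mod
      (fun k => pvT (L.countP (fun v => decide (k ≤ v)))) (PySem.List.pyRange 1 (h + 1) 1) 0
    simp only [zero_add] at this
    rw [show PySem.Int.mod (0:Int) pvMOD = 0 by decide] at this
    rw [← this]
    apply PySem.List.foldl_congr_mem
    intro c k _
    congr 1
    simp only [pv_cnt k, ge_iff_le, Int.toNat_natCast, pvT, hLdef, PySem.Dict.values]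
  -- B's value
  have hB : countGoodSubsequence_alt name = PySem.Int.mod (pvBsum fs 0) pvMOD := by
    show pvAltLoop fs 1 0 = _
    have := pv_altLoop fs 0 0
    rw [show PySem.Int.mod ((2:Int) ^ 0) pvMOD = 1 by decide,
        show PySem.Int.mod (0:Int) pvMOD = 0 by decide, zero_add] at this
    exact this
  rw [hA, hB, ← pv_main fs hpw hpos 0]
  have hhd : pvHd fs = h := by rw [hfst]; rfl
  rw [hhd]
  congr 1
  apply congrArg
  apply List.map_congr_left
  intro k _
  congr 1
  simp only [zero_add]
  exact (hperm.countP_eq _).symm
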